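-- pv_equiv track=rewrite | github.com/pypi-data/pypi-mirror-383 | packages/bsy-clippy/bsy_clippy-0.3.2-py3-none-any.whl/bsy_clippy/cli.py | strip_think_segments
-- ===== SOURCE A (Python) =====
-- from typing import IO, Dict, List, Optional, Sequence, Tuple
--
-- def strip_think_segments(text: str) -> str:
--     if not text:
--         return ""
--     result: List[str] = []
--     idx = 0
--     in_think = False
--     while idx < len(text):
--         if in_think:
--             close_idx = text.find("</think>", idx)
--             if close_idx == -1:
--                 break
--             idx = close_idx + len("</think>")
--             in_think = False
--         else:
--             open_idx = text.find("<think>", idx)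
--             if open_idx == -1:
--                 result.append(text[idx:])
--                 break
--             if open_idx > idx:
--                 result.append(text[idx:open_idx])
--             idx = open_idx + len("<think>")
--             in_think = True
--     return "".join(result).strip()
-- ===== SOURCE B (Python) =====
-- def strip_think_segments(text: str) -> str:
--     def go(s: str) -> str:
--         i = s.find("<think>")
--         if i == -1:
--             return s
--         j = s.find("</think>", i + 7)
--         if j == -1:
--             return s[:i]
--         return s[:i] + go(s[j + 8:])
--     return go(text).strip()
-- ===== Notes on version B (the rewrite author's own statement) =====
-- stated objective: simpler
-- what changed: Replaces the index-tracking while loop with an in_think flag and a result list by a direct structural recursion that, per step, locates one <think>...</think> segment, keeps the prefix and recurses on the suffix.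
import Mathlib
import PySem

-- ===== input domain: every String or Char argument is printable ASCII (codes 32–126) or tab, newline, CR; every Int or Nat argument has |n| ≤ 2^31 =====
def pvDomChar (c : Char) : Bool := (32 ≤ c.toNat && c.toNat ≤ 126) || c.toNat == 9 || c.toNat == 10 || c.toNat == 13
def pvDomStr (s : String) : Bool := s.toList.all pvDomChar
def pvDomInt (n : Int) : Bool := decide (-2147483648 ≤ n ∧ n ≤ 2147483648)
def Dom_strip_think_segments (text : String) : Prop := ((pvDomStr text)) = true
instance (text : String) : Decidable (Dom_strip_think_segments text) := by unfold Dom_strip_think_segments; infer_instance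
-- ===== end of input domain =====

-- B replaces A's index-tracking while loop (in_think flag + result list) by a direct
-- structural recursion removing one <think>…</think> segment per step; objective: simpler.

def pvOpenTag : List Char := ['<', 't', 'h', 'i', 'n', 'k', '>']
def pvCloseTag : List Char := ['<', '/', 't', 'h', 'i', 'n', 'k', '>']

-- ===== PORT A =====
-- A's while loop: state (idx, in_think, result); each iteration advances idx past a tag.
def pvLoopA (s : List Char) (idx : Nat) (inThink : Bool) (acc : List (List Char)) :
    List (List Char) :=
  if hlt : idx < s.length then
    if inThink then
      -- close_idx = text.find("</think>", idx); idx = close_idx + 8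
      if hc : PySem.Chars.findFrom s pvCloseTag (idx : Int) = -1 then acc
      else pvLoopA s ((PySem.Chars.findFrom s pvCloseTag (idx : Int)).toNat + 8) false acc
    else
      -- open_idx = text.find("<think>", idx)
      if ho : PySem.Chars.findFrom s pvOpenTag (idx : Int) = -1 then
        acc ++ [PySem.Chars.slice s (some (idx : Int)) none]
      else
        pvLoopA s ((PySem.Chars.findFrom s pvOpenTag (idx : Int)).toNat + 7) true
          (if (idx : Int) < PySem.Chars.findFrom s pvOpenTag (idx : Int) then
             acc ++ [PySem.Chars.slice s (some (idx : Int))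
                        (some (PySem.Chars.findFrom s pvOpenTag (idx : Int)))]
           else acc)
  else acc
termination_by s.length - idx
decreasing_by
  · have hge := (PySem.Chars.findFrom_natCast_spec s pvCloseTag idx (Nat.le_of_lt hlt) hc).1
    omega
  · have hge := (PySem.Chars.findFrom_natCast_spec s pvOpenTag idx (Nat.le_of_lt hlt) ho).1
    omega

def strip_think_segments (text : String) : String :=
  if text = "" then ""
  else
    -- "".join(result).strip(): joining with the empty separator is flatten (exact)
    String.ofList (PySem.Chars.strip (pvLoopA text.toList 0 false []).flatten)

-- ===== PORT B =====
-- facts cited by pvGoB's decreasing_by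
theorem pvFind_bound (s : List Char) (hi : PySem.Chars.find s pvOpenTag ≠ -1) :
    0 ≤ PySem.Chars.find s pvOpenTag ∧ (PySem.Chars.find s pvOpenTag).toNat + 7 ≤ s.length := by
  have h0 : 0 ≤ PySem.Chars.find s pvOpenTag :=
    (PySem.Chars.find_nonneg_iff s pvOpenTag).mpr ((PySem.Chars.find_ne_neg_one_iff s pvOpenTag).mp hi)
  have hp := (PySem.Chars.find_spec h0).1
  have hl := hp.length_le
  rw [List.length_drop] at hl
  have h7 : pvOpenTag.length = 7 := rfl
  exact ⟨h0, by omega⟩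

theorem pvGoB_close_nonneg (s : List Char) (hi : PySem.Chars.find s pvOpenTag ≠ -1)
    (hj : PySem.Chars.findFrom s pvCloseTag (PySem.Chars.find s pvOpenTag + 7) ≠ -1) :
    0 ≤ PySem.Chars.findFrom s pvCloseTag (PySem.Chars.find s pvOpenTag + 7) := by
  obtain ⟨h0, hb⟩ := pvFind_bound s hi
  have h7 : PySem.Chars.find s pvOpenTag + 7 =
      (((PySem.Chars.find s pvOpenTag).toNat + 7 : Nat) : Int) := by omega
  rw [h7] at hj ⊢
  have := (PySem.Chars.findFrom_natCast_spec s pvCloseTag _ hb hj).1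
  omega

theorem pvDropLt (s : List Char) (j : Int)
    (hi : PySem.Chars.find s pvOpenTag ≠ -1) (hj0 : 0 ≤ j) :
    (PySem.Chars.slice s (some (j + 8)) none).length < s.length := by
  obtain ⟨_, hb⟩ := pvFind_bound s hi
  rw [PySem.Chars.slice_eq_listSlice, PySem.List.slice_from s (show (0:Int) ≤ j + 8 by omega)]
  simp only [List.length_drop]
  omega

def pvGoB (s : List Char) : List Char :=
  if hi : PySem.Chars.find s pvOpenTag = -1 then s
  else
    if hj : PySem.Chars.findFrom s pvCloseTag (PySem.Chars.find s pvOpenTag + 7) = -1 then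
      PySem.Chars.slice s none (some (PySem.Chars.find s pvOpenTag))
    else
      PySem.Chars.slice s none (some (PySem.Chars.find s pvOpenTag)) ++
        pvGoB (PySem.Chars.slice s
          (some (PySem.Chars.findFrom s pvCloseTag (PySem.Chars.find s pvOpenTag + 7) + 8)) none)
termination_by s.length
decreasing_by exact pvDropLt s _ hi (pvGoB_close_nonneg s hi hj)

def strip_think_segments_alt (text : String) : String :=
  String.ofList (PySem.Chars.strip (pvGoB text.toList))

-- ===== PRECONDITION & SPEC =====
def Spec_strip_think_segments (text : String) (out : String) : Prop := out = strip_think_segments_alt text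
instance (text : String) (out : String) : Decidable (Spec_strip_think_segments text out) := by unfold Spec_strip_think_segments; infer_instance

-- ===== CLAIM (what is proved, stated in full; the proofs are below) =====
def Claim_equal_strip_think_segments : Prop := ∀ (text : String), Dom_strip_think_segments text → Spec_strip_think_segments text (strip_think_segments text)

-- ===== LEMMAS AND PROOFS =====

theorem pvGoB_nil : pvGoB [] = [] := by
  rw [pvGoB]
  simp [show PySem.Chars.find [] pvOpenTag = -1 from by decide]

theorem pvClose_bound (u : List Char) (hg : PySem.Chars.find u pvCloseTag ≠ -1) :
    0 ≤ PySem.Chars.find u pvCloseTag ∧ (PySem.Chars.find u pvCloseTag).toNat + 8 ≤ u.length := by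
  have h0 : 0 ≤ PySem.Chars.find u pvCloseTag :=
    (PySem.Chars.find_nonneg_iff u pvCloseTag).mpr ((PySem.Chars.find_ne_neg_one_iff u pvCloseTag).mp hg)
  have hp := (PySem.Chars.find_spec h0).1
  have hl := hp.length_le
  rw [List.length_drop] at hl
  have h8 : pvCloseTag.length = 8 := rfl
  exact ⟨h0, by omega⟩

theorem pvLoopA_eq (s : List Char) (idx : Nat) (acc : List (List Char)) (h : idx ≤ s.length) :
    (pvLoopA s idx false acc).flatten = acc.flatten ++ pvGoB (s.drop idx) := by
  rw [pvLoopA]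
  by_cases hlt : idx < s.length
  · rw [dif_pos hlt]
    simp only [Bool.false_eq_true, if_false]
    rw [PySem.Chars.findFrom_natCast s pvOpenTag idx h]
    by_cases hfo : PySem.Chars.find (s.drop idx) pvOpenTag = -1
    · rw [dif_pos (by simp [hfo])]
      rw [pvGoB, dif_pos hfo]
      simp [PySem.Chars.slice_eq_listSlice, PySem.List.slice_from_natCast]
    · obtain ⟨hF0, hF7⟩ := pvFind_bound (s.drop idx) hfo
      rw [List.length_drop] at hF7
      rw [dif_neg (by simp [hfo]; omega)]
      simp only [if_neg hfo]
      have hto : ((idx : Int) + PySem.Chars.find (s.drop idx) pvOpenTag).toNat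
          = idx + (PySem.Chars.find (s.drop idx) pvOpenTag).toNat := by omega
      rw [hto]
      set F := PySem.Chars.find (List.drop idx s) pvOpenTag with hFdef
      set acc' := (if (idx : Int) < (idx : Int) + F then
          acc ++ [PySem.Chars.slice s (some (idx : Int)) (some ((idx : Int) + F))]
        else acc) with haccdef
      have hacc : acc'.flatten =
          acc.flatten ++ PySem.Chars.slice (List.drop idx s) none (some F) := by
        rw [PySem.Chars.slice_eq_listSlice, PySem.List.slice_to (List.drop idx s) hF0]
        by_cases hFpos : 0 < F
        · rw [haccdef, if_pos (by omega)]
          have hcast : (idx : Int) + F = ((idx + F.toNat : Nat) : Int) := by omega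
          rw [hcast, PySem.Chars.slice_eq_listSlice, PySem.List.slice_natCast]
          simp
        · have hF0' : F = 0 := by omega
          rw [haccdef, if_neg (by omega), hF0']
          simp
      rw [pvGoB, dif_neg hfo, ← hFdef]
      have hc1 : F + 7 = ((F.toNat + 7 : Nat) : Int) := by omega
      rw [hc1, PySem.Chars.findFrom_natCast (s.drop idx) pvCloseTag (F.toNat + 7)
        (by rw [List.length_drop]; omega)]
      have hdd : (List.drop idx s).drop (F.toNat + 7) = List.drop (idx + F.toNat + 7) s := by
        rw [List.drop_drop, Nat.add_assoc]
      rw [hdd]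
      set G := PySem.Chars.find (List.drop (idx + F.toNat + 7) s) pvCloseTag with hGdef
      by_cases h2 : idx + F.toNat + 7 < s.length
      · rw [pvLoopA, dif_pos h2, if_pos rfl]
        have heq : PySem.Chars.findFrom s pvCloseTag ((idx + F.toNat + 7 : Nat) : Int)
            = if G = -1 then -1 else ((idx + F.toNat + 7 : Nat) : Int) + G := by
          rw [PySem.Chars.findFrom_natCast s pvCloseTag (idx + F.toNat + 7) (Nat.le_of_lt h2), ← hGdef]
        by_cases hg : G = -1
        · rw [dif_pos (by rw [heq, if_pos hg]), dif_pos (by rw [if_pos hg]), hacc]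
        · have hGge := PySem.Chars.neg_one_le_find (List.drop (idx + F.toNat + 7) s) pvCloseTag
          rw [← hGdef] at hGge
          obtain ⟨hG0, hG8⟩ := pvClose_bound (List.drop (idx + F.toNat + 7) s) hg
          rw [List.length_drop] at hG8
          rw [← hGdef] at hG0 hG8
          have hcc : PySem.Chars.findFrom s pvCloseTag ((idx + F.toNat + 7 : Nat) : Int)
              = ((idx + F.toNat + 7 : Nat) : Int) + G := by rw [heq, if_neg hg]
          have hto2 : (((idx + F.toNat + 7 : Nat) : Int) + G).toNat
              = idx + F.toNat + 7 + G.toNat := by omega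
          rw [dif_neg (by rw [hcc]; omega), hcc, hto2,
            pvLoopA_eq s (idx + F.toNat + 7 + G.toNat + 8) acc' (by omega), hacc,
            dif_neg (show ¬ (if G = -1 then (-1 : Int) else ((F.toNat + 7 : Nat) : Int) + G) = -1
              by rw [if_neg hg]; omega)]
          rw [if_neg hg]
          have hsl2 : PySem.Chars.slice (List.drop idx s)
              (some (((F.toNat + 7 : Nat) : Int) + G + 8)) none
              = List.drop (idx + F.toNat + 7 + G.toNat + 8) s := by
            rw [PySem.Chars.slice_eq_listSlice,
              PySem.List.slice_from (List.drop idx s)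
                (show (0:Int) ≤ ((F.toNat + 7 : Nat) : Int) + G + 8 by omega),
              List.drop_drop]
            congr 1
            omega
          rw [hsl2]
          simp [List.append_assoc]
      · have hnil : List.drop (idx + F.toNat + 7) s = [] :=
          List.drop_eq_nil_of_le (by omega)
        have hG : G = -1 := by rw [hGdef, hnil]; decide
        rw [pvLoopA, dif_neg h2, dif_pos (by rw [if_pos hG]), hacc]
  · rw [dif_neg hlt]
    rw [List.drop_eq_nil_of_le (by omega), pvGoB_nil, List.append_nil]
termination_by s.length - idx

-- ===== VERDICT (by name: the statement is the Claim_ definition above) =====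
theorem strip_think_segments_spec : Claim_equal_strip_think_segments := by
  intro text _
  unfold Spec_strip_think_segments strip_think_segments strip_think_segments_alt
  by_cases he : text = ""
  · subst he
    simp [pvGoB_nil, show ("" : String).toList = [] from rfl,
      show PySem.Chars.strip [] = [] from by decide]
  · rw [if_neg he, pvLoopA_eq text.toList 0 [] (Nat.zero_le _)]
    simp
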